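-- pv_equiv track=rewrite | github.com/jesuslz/Automatization | hoy/fallos/CountFailedBar.py | clasificar_520_513_another
-- ===== SOURCE A (Python) =====
-- def clasificar_520_513_another(null_list, null_513, null_520, null_another):
--     '''Esta funcion clasifica entre los que son nulos con sus correspondientes
--     codigos de error ####pendiente generalizar esta funcion para que reciba una
--     lista de todos los posibles errores### en esta situacion solo resuelve para
--     dos errores'''
--     for i in range(len(null_list)):
--         if '513' in null_list[i]:
--             null_513.append(null_list[i])
--             null_list[i] = None
--         elif '520' in null_list[i]:
--             null_520.append(null_list[i])
--             null_list[i] = None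
--         else:
--             null_another.append(null_list[i])
--             null_list[i] = None
--
--     return null_513, null_520, null_another
-- ===== SOURCE B (Python) =====
-- def clasificar_520_513_another(null_list, null_513, null_520, null_another):
--     """Three filtering passes instead of one classifying loop; same return
--     value, and the input list is nulled out at the end like the original."""
--     null_513.extend(x for x in null_list if '513' in x)
--     null_520.extend(x for x in null_list if '520' in x and '513' not in x)
--     null_another.extend(x for x in null_list if '513' not in x and '520' not in x)
--     for i in range(len(null_list)):
--         null_list[i] = None
--     return null_513, null_520, null_another
-- ===== Notes on version B (the rewrite author's own statement) =====
-- stated objective: alternative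
-- what changed: Replaces the single index loop that classifies each element with an if/elif/else chain by three independent filtering passes (one comprehension per bucket), with the input-nulling side effect done in a separate final pass.
import Mathlib
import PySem

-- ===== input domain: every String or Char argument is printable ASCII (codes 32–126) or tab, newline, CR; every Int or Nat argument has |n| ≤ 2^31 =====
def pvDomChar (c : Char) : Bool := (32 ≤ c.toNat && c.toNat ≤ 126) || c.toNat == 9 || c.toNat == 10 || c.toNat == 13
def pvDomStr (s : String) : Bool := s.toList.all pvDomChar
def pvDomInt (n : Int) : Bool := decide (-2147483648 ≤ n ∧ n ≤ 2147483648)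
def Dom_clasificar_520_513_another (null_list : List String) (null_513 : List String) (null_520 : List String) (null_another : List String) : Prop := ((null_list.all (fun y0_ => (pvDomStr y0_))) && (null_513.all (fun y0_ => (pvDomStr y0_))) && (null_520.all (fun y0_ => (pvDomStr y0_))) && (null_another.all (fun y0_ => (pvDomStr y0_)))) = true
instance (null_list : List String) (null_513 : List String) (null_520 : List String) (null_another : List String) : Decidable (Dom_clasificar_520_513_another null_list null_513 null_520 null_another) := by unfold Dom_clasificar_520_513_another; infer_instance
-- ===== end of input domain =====

-- B replaces A's single classifying loop with three filtering passes; A mutates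
-- null_list in place (sets slots to None) — the equivalence is about the return value only.


-- ===== PORT A =====
-- A's loop over the list, carrying the three bucket lists; return value only
-- (A also sets every slot of null_list to None as it goes; B nulls them in a final pass).
def pvLoopA : List String → List String → List String → List String → List String × List String × List String
  | [], a513, a520, aan => (a513, a520, aan)
  | x :: xs, a513, a520, aan =>
    if PySem.Str.isIn "513" x then pvLoopA xs (a513 ++ [x]) a520 aan
    else if PySem.Str.isIn "520" x then pvLoopA xs a513 (a520 ++ [x]) aan
    else pvLoopA xs a513 a520 (aan ++ [x])

def clasificar_520_513_another (null_list : List String) (null_513 : List String) (null_520 : List String) (null_another : List String) : List String × List String × List String :=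
  pvLoopA null_list null_513 null_520 null_another

-- ===== PORT B =====
def clasificar_520_513_another_alt (null_list : List String) (null_513 : List String) (null_520 : List String) (null_another : List String) : List String × List String × List String :=
  (null_513 ++ null_list.filter (fun x => PySem.Str.isIn "513" x),
   null_520 ++ null_list.filter (fun x => PySem.Str.isIn "520" x && !PySem.Str.isIn "513" x),
   null_another ++ null_list.filter (fun x => !PySem.Str.isIn "513" x && !PySem.Str.isIn "520" x))

-- ===== PRECONDITION & SPEC =====
def Spec_clasificar_520_513_another (null_list : List String) (null_513 : List String) (null_520 : List String) (null_another : List String) (out : List String × List String × List String) : Prop := out = clasificar_520_513_another_alt null_list null_513 null_520 null_another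
instance (null_list : List String) (null_513 : List String) (null_520 : List String) (null_another : List String) (out : List String × List String × List String) : Decidable (Spec_clasificar_520_513_another null_list null_513 null_520 null_another out) := by unfold Spec_clasificar_520_513_another; infer_instance

-- ===== CLAIM (what is proved, stated in full; the proofs are below) =====
def Claim_equal_clasificar_520_513_another : Prop := ∀ (null_list : List String) (null_513 : List String) (null_520 : List String) (null_another : List String), Dom_clasificar_520_513_another null_list null_513 null_520 null_another → Spec_clasificar_520_513_another null_list null_513 null_520 null_another (clasificar_520_513_another null_list null_513 null_520 null_another)

-- ===== LEMMAS AND PROOFS =====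

lemma pvLoopA_eq (xs : List String) : ∀ a b c : List String,
    pvLoopA xs a b c =
      (a ++ xs.filter (fun x => PySem.Str.isIn "513" x),
       b ++ xs.filter (fun x => PySem.Str.isIn "520" x && !PySem.Str.isIn "513" x),
       c ++ xs.filter (fun x => !PySem.Str.isIn "513" x && !PySem.Str.isIn "520" x)) := by
  induction xs with
  | nil => intro a b c; simp [pvLoopA]
  | cons x xs ih =>
    intro a b c
    simp only [pvLoopA, List.filter_cons, ih]
    by_cases h1 : PySem.Chars.isIn ['5','1','3'] x.toList = true
      <;> by_cases h2 : PySem.Chars.isIn ['5','2','0'] x.toList = true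
      <;> simp [h1, h2]

-- ===== VERDICT (by name: the statement is the Claim_ definition above) =====
theorem clasificar_520_513_another_spec : Claim_equal_clasificar_520_513_another := by
  intro nl a b c _
  unfold Spec_clasificar_520_513_another clasificar_520_513_another clasificar_520_513_another_alt
  exact pvLoopA_eq nl a b c
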